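-- pv_equiv track=rewrite | github.com/Madhan-2213/desktop-tutorial | pilingup.py | isVertical
-- ===== SOURCE A (Python) =====
-- def isVertical(blocks):
--     stk = [float('inf')]
--     while len(blocks):
--         if blocks[0] >= blocks[-1]:
--             if stk[-1] >= blocks[0]:
--                 stk.append(blocks.pop(0))
--             else:
--                 return 'No'
--         else:
--             if stk[-1] >= blocks[-1]:
--                 stk.append(blocks.pop(-1))
--             else:
--                 return 'No'
--     return 'Yes'
-- ===== SOURCE B (Python) =====
-- def isVertical(blocks):
--     # Two-pointer scan from both ends; no mutation of blocks (A empties its argument).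
--     i, j = 0, len(blocks) - 1
--     last = None
--     while i <= j:
--         if blocks[i] >= blocks[j]:
--             x = blocks[i]
--             i += 1
--         else:
--             x = blocks[j]
--             j -= 1
--         if last is not None and x > last:
--             return 'No'
--         last = x
--     return 'Yes'
-- ===== Notes on version B (the rewrite author's own statement) =====
-- stated objective: faster
-- what changed: Replaced the destructive pop(0)/pop(-1) loop with an auxiliary stack by a two-pointer scan over the untouched list that only tracks the last taken value; B does not mutate its argument.
import Mathlib
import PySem

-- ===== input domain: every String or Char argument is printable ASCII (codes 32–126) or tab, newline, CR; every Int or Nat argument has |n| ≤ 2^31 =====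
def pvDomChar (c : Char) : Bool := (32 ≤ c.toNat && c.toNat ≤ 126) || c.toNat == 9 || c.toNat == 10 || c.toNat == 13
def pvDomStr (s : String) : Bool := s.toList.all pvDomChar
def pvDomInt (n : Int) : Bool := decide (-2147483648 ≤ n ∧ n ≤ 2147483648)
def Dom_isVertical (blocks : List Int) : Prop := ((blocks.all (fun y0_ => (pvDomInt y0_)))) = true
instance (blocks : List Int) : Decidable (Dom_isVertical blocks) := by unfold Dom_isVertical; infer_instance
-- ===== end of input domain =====

-- B replaces A's destructive pop(0)/pop(-1) loop with an O(n) two-pointer scan tracking only the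
-- last taken value; equivalence is about the RETURN value only (A empties its argument list, B does not mutate it).

-- ===== PORT A =====
-- stack entries: none = the initial float('inf') sentinel, some v = a pushed block
-- stk[-1] >= x  (stk is never empty: it starts as [inf] and only grows)
def pvTopGe (stk : List (Option Int)) (x : Int) : Bool :=
  match stk.getLast? with
  | some none => true
  | some (some v) => decide (x ≤ v)
  | none => true   -- unreachable: stk never empty

def isVerticalLoop (blocks : List Int) (stk : List (Option Int)) : String :=
  match blocks with
  | [] => "Yes"
  | b :: bs =>
    let back := (b :: bs).getLast (by simp)
    if b ≥ back then
      if pvTopGe stk b then isVerticalLoop bs (stk ++ [some b]) else "No"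
    else
      if pvTopGe stk back then isVerticalLoop ((b :: bs).dropLast) (stk ++ [some back]) else "No"
termination_by blocks.length
decreasing_by
  · simp
  · simp [List.length_dropLast]

def isVertical (blocks : List Int) : String := isVerticalLoop blocks [none]

-- ===== PORT B =====
-- indices i, j always stay in range while i ≤ j, so the pyGet? defaults are never used
def isVerticalAltLoop (blocks : List Int) (i j : Int) (last : Option Int) : String :=
  if h : i ≤ j then
    let bi := (PySem.List.pyGet? blocks i).getD 0
    let bj := (PySem.List.pyGet? blocks j).getD 0
    if bi ≥ bj then
      match last with
      | some l => if bi > l then "No" else isVerticalAltLoop blocks (i + 1) j (some bi)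
      | none => isVerticalAltLoop blocks (i + 1) j (some bi)
    else
      match last with
      | some l => if bj > l then "No" else isVerticalAltLoop blocks i (j - 1) (some bj)
      | none => isVerticalAltLoop blocks i (j - 1) (some bj)
  else "Yes"
termination_by (j + 1 - i).toNat
decreasing_by all_goals omega

def isVertical_alt (blocks : List Int) : String :=
  isVerticalAltLoop blocks 0 (PySem.List.len blocks - 1) none

-- ===== PRECONDITION & SPEC =====
def Spec_isVertical (blocks : List Int) (out : String) : Prop := out = isVertical_alt blocks
instance (blocks : List Int) (out : String) : Decidable (Spec_isVertical blocks out) := by unfold Spec_isVertical; infer_instance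

-- ===== CLAIM (what is proved, stated in full; the proofs are below) =====
def Claim_equal_isVertical : Prop := ∀ (blocks : List Int), Dom_isVertical blocks → Spec_isVertical blocks (isVertical blocks)

-- ===== LEMMAS AND PROOFS =====

-- A's loop only looks at the top of the stack
theorem loopA_top : ∀ (n : Nat) (blocks : List Int) (s : List (Option Int)) (t : Option Int),
    blocks.length = n → s.getLast? = some t →
    isVerticalLoop blocks s = isVerticalLoop blocks [t] := by
  intro n
  induction n using Nat.strong_induction_on with
  | _ n ih =>
    intro blocks s t hlen hs
    match blocks with
    | [] => simp [isVerticalLoop]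
    | b :: bs =>
      rw [isVerticalLoop, isVerticalLoop]
      have htop : ∀ x, pvTopGe s x = pvTopGe [t] x := by
        intro x; simp [pvTopGe, hs]
      simp only [htop]
      have hm : bs.length < n := by simp at hlen; omega
      have e1 := ih bs.length hm bs (s ++ [some b]) (some b) rfl (by simp)
      have e2 := ih bs.length hm bs ([t] ++ [some b]) (some b) rfl (by simp)
      have e3 := ih bs.length hm ((b :: bs).dropLast)
        (s ++ [some ((b :: bs).getLast (by simp))]) (some ((b :: bs).getLast (by simp)))
        (by simp) (by simp)
      have e4 := ih bs.length hm ((b :: bs).dropLast)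
        ([t] ++ [some ((b :: bs).getLast (by simp))]) (some ((b :: bs).getLast (by simp)))
        (by simp) (by simp)
      split_ifs with h1 h2 h2
      · rw [e1, e2]
      · rfl
      · rw [e3, e4]
      · rfl

-- B's two-pointer loop on [a, b) computes A's loop on the corresponding sublist
theorem loopB_eq_loopA : ∀ (n : Nat) (blocks : List Int) (a b : Nat) (t : Option Int),
    a + n = b → b ≤ blocks.length →
    isVerticalAltLoop blocks (↑a) (↑b - 1) t = isVerticalLoop ((blocks.drop a).take n) [t] := by
  intro n
  induction n with
  | zero =>
    intro blocks a b t hab hb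
    rw [isVerticalAltLoop, dif_neg (by omega)]
    simp [isVerticalLoop]
  | succ m ih =>
    intro blocks a b t hab hb
    have ha : a < blocks.length := by omega
    have ham : a + m < blocks.length := by omega
    have hj : ((b : Int) - 1) = ((a + m : Nat) : Int) := by push_cast; omega
    have hdrop : blocks.drop a = blocks[a] :: blocks.drop (a+1) := List.drop_eq_getElem_cons ha
    have hseg : (blocks.drop a).take (m+1) = blocks[a] :: (blocks.drop (a+1)).take m := by
      rw [hdrop]; rfl
    have hlast? : (blocks[a] :: (blocks.drop (a+1)).take m).getLast? = some blocks[a+m] := by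
      rw [← hseg, List.getLast?_eq_getElem?]
      have hl : ((blocks.drop a).take (m+1)).length = m + 1 := by simp; omega
      rw [hl, Nat.add_sub_cancel, List.getElem?_take, if_pos (by omega), List.getElem?_drop,
        List.getElem?_eq_getElem ham]
    have hback : (blocks[a] :: (blocks.drop (a+1)).take m).getLast (by simp) = blocks[a+m] :=
      Option.some.inj ((List.getLast?_eq_some_getLast (by simp)).symm.trans hlast?)
    have hdl : (blocks[a] :: (blocks.drop (a+1)).take m).dropLast = (blocks.drop a).take m := by
      rw [← hseg, List.dropLast_eq_take, List.take_take]
      have hl : ((blocks.drop a).take (m+1)).length = m + 1 := by simp; omega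
      rw [hl]
      simp
    rw [isVerticalAltLoop, dif_pos (by omega)]
    simp only [hj, PySem.List.pyGet?_natCast,
      List.getElem?_eq_getElem ha, List.getElem?_eq_getElem ham, Option.getD_some]
    rw [hseg, isVerticalLoop]
    simp only [hback]
    -- align B's recursive-call indices with Nat casts so the IH applies verbatim
    rw [show ((a : Int) + 1) = ((a + 1 : Nat) : Int) by push_cast; ring,
      show ((a + m : Nat) : Int) = ((a + 1 + m : Nat) : Int) - 1 by push_cast; ring]
    have hrecB1 := ih blocks (a+1) (a+1+m) (some blocks[a]) (by omega) (by omega)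
    have hrecB2 := ih blocks a (a+m) (some blocks[a+m]) (by omega) (by omega)
    rw [show (((a + 1 + m : Nat) : Int) - 1 - 1) = ((a + m : Nat) : Int) - 1 by push_cast; ring]
    by_cases hcmp : blocks[a] ≥ blocks[a+m]
    · rw [if_pos hcmp, if_pos hcmp]
      have hrecA : isVerticalLoop ((blocks.drop (a+1)).take m) ([t] ++ [some blocks[a]])
          = isVerticalLoop ((blocks.drop (a+1)).take m) [some blocks[a]] :=
        loopA_top _ _ _ _ rfl (by simp)
      match t with
      | none =>
        dsimp only
        rw [if_pos (show pvTopGe [none] blocks[a] = true by simp [pvTopGe]), hrecA]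
        exact hrecB1
      | some l =>
        dsimp only
        by_cases hle : blocks[a] ≤ l
        · rw [if_neg (show ¬ (blocks[a] > l) by omega),
            if_pos (show pvTopGe [some l] blocks[a] = true by simp [pvTopGe, hle]), hrecA]
          exact hrecB1
        · rw [if_pos (show blocks[a] > l by omega),
            if_neg (show ¬ (pvTopGe [some l] blocks[a] = true) by simp [pvTopGe]; omega)]
    · rw [if_neg hcmp, if_neg hcmp, hdl]
      have hrecA : isVerticalLoop ((blocks.drop a).take m) ([t] ++ [some blocks[a+m]])
          = isVerticalLoop ((blocks.drop a).take m) [some blocks[a+m]] :=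
        loopA_top _ _ _ _ rfl (by simp)
      match t with
      | none =>
        dsimp only
        rw [if_pos (show pvTopGe [none] blocks[a+m] = true by simp [pvTopGe]), hrecA]
        exact hrecB2
      | some l =>
        dsimp only
        by_cases hle : blocks[a+m] ≤ l
        · rw [if_neg (show ¬ (blocks[a+m] > l) by omega),
            if_pos (show pvTopGe [some l] blocks[a+m] = true by simp [pvTopGe, hle]), hrecA]
          exact hrecB2
        · rw [if_pos (show blocks[a+m] > l by omega),
            if_neg (show ¬ (pvTopGe [some l] blocks[a+m] = true) by simp [pvTopGe]; omega)]

-- ===== VERDICT (by name: the statement is the Claim_ definition above) =====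
theorem isVertical_spec : Claim_equal_isVertical := by
  intro blocks _
  unfold Spec_isVertical isVertical isVertical_alt
  have h := loopB_eq_loopA blocks.length blocks 0 blocks.length none (by omega) (le_refl _)
  simp only [List.drop_zero, List.take_length, Nat.cast_zero] at h
  simpa [PySem.List.len_eq] using h.symm
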